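-- pv_equiv track=rewrite | github.com/jaidevreddy/OpsPulse-MCP---Operational-Intelligence-Dashboard | mcp-server/main.py | wrap_long_words
-- ===== SOURCE A (Python) =====
-- def wrap_long_words(text: str, max_len: int = 80) -> str:
--     """
--     FPDF crashes if a SINGLE WORD is longer than the page width.
--     This function breaks long unbroken strings safely.
--     """
--     out_lines = []
--
--     for line in text.split("\n"):
--         words = line.split(" ")
--         new_words = []
--
--         for w in words:
--             if len(w) > max_len:
--                 chunks = [w[i : i + max_len] for i in range(0, len(w), max_len)]
--                 new_words.extend(chunks)
--             else:
--                 new_words.append(w)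
--
--         out_lines.append(" ".join(new_words))
--
--     return "\n".join(out_lines)
-- ===== SOURCE B (Python) =====
-- def wrap_long_words(text: str, max_len: int = 80) -> str:
--     # Single left-to-right scan: copy separator chars verbatim, and for each
--     # maximal run of non-separator chars emit it (chunked if too long).
--     out = []
--     i, n = 0, len(text)
--     while i < n:
--         if text[i] in " \n":
--             out.append(text[i])
--             i += 1
--         else:
--             j = i
--             while j < n and text[j] not in " \n":
--                 j += 1
--             w = text[i:j]
--             if len(w) > max_len:
--                 out.append(" ".join(w[k : k + max_len] for k in range(0, len(w), max_len)))
--             else: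
--                 out.append(w)
--             i = j
--     return "".join(out)
-- ===== Notes on version B (the rewrite author's own statement) =====
-- stated objective: alternative
-- what changed: Replaces the split-on-newline / split-on-space / rejoin pipeline with a single left-to-right scan that copies separator characters verbatim and chunks each maximal non-separator run in place.
-- outside the precondition, e.g. on wrap_long_words('ab cd', -1): A returns '', B returns ' '; on wrap_long_words(' ', 0): A returns ' ', B returns ' '
import Mathlib
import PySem

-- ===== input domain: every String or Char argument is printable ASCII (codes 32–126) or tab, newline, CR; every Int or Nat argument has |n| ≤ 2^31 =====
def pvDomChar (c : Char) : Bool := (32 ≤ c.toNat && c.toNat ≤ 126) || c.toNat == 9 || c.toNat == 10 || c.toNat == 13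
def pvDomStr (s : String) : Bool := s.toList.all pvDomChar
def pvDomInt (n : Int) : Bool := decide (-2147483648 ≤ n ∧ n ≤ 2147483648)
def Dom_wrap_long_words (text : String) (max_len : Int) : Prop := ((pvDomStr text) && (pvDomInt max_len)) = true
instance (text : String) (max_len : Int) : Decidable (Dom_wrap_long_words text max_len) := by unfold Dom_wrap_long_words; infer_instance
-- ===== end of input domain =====

-- B replaces A's split-on-newline / split-on-space / rejoin pipeline by a single left-to-right
-- scan that copies separator characters verbatim and chunks each maximal non-separator run
-- in place (objective: alternative, same asymptotic cost).

-- ===== PORT A =====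
-- [w[i : i + max_len] for i in range(0, len(w), max_len)]  (this comprehension appears verbatim in both sources)
def pvChunks (w : List Char) (m : Int) : List (List Char) :=
  (PySem.List.pyRange 0 (w.length : Int) m).map (fun i => PySem.List.slice w (some i) (some (i + m)))

def wrap_long_words (text : String) (max_len : Int) : String :=
  let out_lines : List (List Char) :=
    (PySem.Chars.splitOn text.toList ['\n']).foldl (fun out_lines line =>
      let words := PySem.Chars.splitOn line [' ']
      let new_words := words.foldl (fun nw w =>
        if (w.length : Int) > max_len then nw ++ pvChunks w max_len else nw ++ [w]) []
      out_lines ++ [PySem.Chars.join [' '] new_words]) []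
  String.ofList (PySem.Chars.join ['\n'] out_lines)

-- ===== PORT B =====
def pvRepl (w : List Char) (m : Int) : List Char :=
  if (w.length : Int) > m then PySem.Chars.join [' '] (pvChunks w m) else w

def pvNonSep (c : Char) : Bool := !(c == ' ' || c == '\n')

-- the while-loop scan of Source B: separators copied verbatim, maximal runs replaced
def pvScan (m : Int) : List Char → List Char
  | [] => []
  | c :: rest =>
    if pvNonSep c then
      pvRepl (c :: rest.takeWhile pvNonSep) m ++ pvScan m (rest.dropWhile pvNonSep)
    else
      c :: pvScan m rest
termination_by l => l.length
decreasing_by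
  · simp only [List.length_cons]
    exact Nat.lt_succ_of_le (List.length_dropWhile_le pvNonSep rest)
  · simp

def wrap_long_words_alt (text : String) (max_len : Int) : String :=
  String.ofList (pvScan max_len text.toList)

-- ===== PRECONDITION & SPEC =====
-- Pre_ excludes max_len ≤ 0: with max_len = 0 both programs raise ValueError (range step 0) as
-- soon as a nonempty word occurs, and for negative max_len A silently drops every word while B
-- keeps the separators — degenerate outputs of a nonsensical limit, neither value specified
-- (on separator-only text with max_len = 0 both happen to agree; that corner is excluded too).
def Pre_wrap_long_words (text : String) (max_len : Int) : Prop := 1 ≤ max_len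
instance (text : String) (max_len : Int) : Decidable (Pre_wrap_long_words text max_len) := by unfold Pre_wrap_long_words; infer_instance
def pvWitness_wrap_long_words : String × Int := ("hello world\nabcdefg", 3)

def Spec_wrap_long_words (text : String) (max_len : Int) (out : String) : Prop := out = wrap_long_words_alt text max_len
instance (text : String) (max_len : Int) (out : String) : Decidable (Spec_wrap_long_words text max_len out) := by unfold Spec_wrap_long_words; infer_instance

-- ===== CLAIM (what is proved, stated in full; the proofs are below) =====
def Claim_equal_wrap_long_words : Prop := ∀ (text : String) (max_len : Int), Dom_wrap_long_words text max_len → Pre_wrap_long_words text max_len → Spec_wrap_long_words text max_len (wrap_long_words text max_len)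

-- ===== LEMMAS AND PROOFS =====

-- per-line value both programs compute, and the whole-text canonical form
def pvLineF (m : Int) (line : List Char) : List Char :=
  PySem.Chars.join [' '] ((line.splitOn ' ').map (pvRepl · m))

def pvCore (m : Int) (l : List Char) : List Char :=
  PySem.Chars.join ['\n'] ((l.splitOn '\n').map (pvLineF m))

theorem splitOn_append_not_mem (a : Char) (w r : List Char) (h : a ∉ w) :
    (w ++ r).splitOn a = (r.splitOn a).modifyHead (w ++ ·) := by
  induction w with
  | nil =>
    cases hr : r.splitOn a with
    | nil => simp [hr]
    | cons x t => simp [hr]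
  | cons b w ih =>
    rw [List.mem_cons, not_or] at h
    have hb : (b == a) = false := by simp; exact fun e => h.1 e.symm
    simp only [List.cons_append, List.splitOn, List.splitOnP_cons, hb, Bool.false_eq_true, if_false] at *
    rw [ih h.2]
    cases hr : r.splitOn a with
    | nil => exact absurd hr (List.splitOnP_ne_nil _ r)
    | cons x t => simp [List.splitOn] at hr; simp [hr]

theorem splitOn_cons_self (a : Char) (l : List Char) : (a :: l).splitOn a = [] :: l.splitOn a := by
  simp [List.splitOn, List.splitOnP_cons]

theorem splitOn_singleton_of_not_mem (a : Char) (w : List Char) (h : a ∉ w) : w.splitOn a = [w] := by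
  have := splitOn_append_not_mem a w [] h
  simpa using this

theorem splitOn_go_eq (s : Char) (fuel : Nat) (l cur : List Char) (acc : List (List Char))
    (h : l.length ≤ fuel) :
    PySem.Chars.splitOn.go [s] fuel l cur acc
      = acc.reverse ++ (l.splitOn s).modifyHead (cur.reverse ++ ·) := by
  induction fuel generalizing l cur acc with
  | zero =>
    have : l = [] := List.eq_nil_of_length_eq_zero (Nat.le_zero.mp h)
    subst this
    rw [PySem.Chars.splitOn.go.eq_def]
    simp
  | succ f ih =>
    cases l with
    | nil => rw [PySem.Chars.splitOn.go.eq_def]; simp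
    | cons c rest =>
      rw [PySem.Chars.splitOn.go.eq_def]
      by_cases hc : c = s
      · subst hc
        have hp : [c].isPrefixOf (c :: rest) = true := by simp [List.isPrefixOf]
        simp only [hp, if_true, List.length_cons, List.length_nil, List.drop_succ_cons, List.drop_zero]
        rw [ih rest [] (cur.reverse :: acc) (by simpa using Nat.le_of_succ_le_succ h)]
        rw [splitOn_cons_self]
        cases hr : rest.splitOn c with
        | nil => exact absurd hr (List.splitOnP_ne_nil _ rest)
        | cons x t => simp
      · have hp : [s].isPrefixOf (c :: rest) = false := by
          simp [List.isPrefixOf]; exact fun e => hc e.symm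
        simp only [hp, Bool.false_eq_true, if_false]
        rw [ih rest (c :: cur) acc (by simpa using Nat.le_of_succ_le_succ h)]
        have hb : (c == s) = false := by simp [hc]
        simp only [List.splitOn, List.splitOnP_cons, hb, Bool.false_eq_true, if_false]
        cases hr : rest.splitOn s with
        | nil => exact absurd hr (List.splitOnP_ne_nil _ rest)
        | cons x t => simp [List.splitOn] at hr; simp [hr]

theorem charsSplitOn_eq (l : List Char) (s : Char) :
    PySem.Chars.splitOn l [s] = l.splitOn s := by
  unfold PySem.Chars.splitOn
  rw [splitOn_go_eq s (l.length + 1) l [] [] (by omega)]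
  cases hr : l.splitOn s with
  | nil => exact absurd hr (List.splitOnP_ne_nil _ l)
  | cons x t => simp

theorem pvChunks_ne_nil (w : List Char) (m : Int) (hw : w ≠ []) (hm : 1 ≤ m) :
    pvChunks w m ≠ [] := by
  unfold pvChunks
  have h0 : (0 : Int) ∈ PySem.List.pyRange 0 (w.length : Int) m := by
    rw [PySem.List.mem_pyRange_iff_of_pos (by omega)]
    refine ⟨le_refl 0, ?_, by simp⟩
    have : 0 < w.length := List.length_pos_iff.mpr hw
    exact_mod_cast this
  intro hnil
  rw [List.map_eq_nil_iff] at hnil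
  rw [hnil] at h0
  exact List.not_mem_nil h0

theorem pvRepl_nil (m : Int) (hm : 1 ≤ m) : pvRepl [] m = [] := by
  unfold pvRepl
  simp only [List.length_nil, Nat.cast_zero]
  rw [if_neg (by omega)]

theorem join_cons_append (sep x y : List Char) (t : List (List Char)) :
    PySem.Chars.join sep ((x ++ y) :: t) = x ++ PySem.Chars.join sep (y :: t) := by
  cases t with
  | nil => simp [PySem.Chars.join_singleton]
  | cons q rest => simp [PySem.Chars.join_cons_cons, List.append_assoc]

theorem join_append_cons' (sep : List Char) (g : List (List Char)) (hg : g ≠ [])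
    (y : List Char) (rest : List (List Char)) :
    PySem.Chars.join sep (g ++ y :: rest)
      = PySem.Chars.join sep g ++ sep ++ PySem.Chars.join sep (y :: rest) := by
  induction g with
  | nil => exact absurd rfl hg
  | cons x g ih =>
    cases g with
    | nil => simp [PySem.Chars.join_cons_cons, PySem.Chars.join_singleton]
    | cons x2 g2 =>
      have e2 : (x2 :: g2) ++ y :: rest = x2 :: (g2 ++ y :: rest) := by simp
      rw [List.cons_append, e2, PySem.Chars.join_cons_cons, ← e2, ih (by simp),
        PySem.Chars.join_cons_cons]
      simp [List.append_assoc]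

theorem join_flatten (sep : List Char) (groups : List (List (List Char)))
    (h : ∀ g ∈ groups, g ≠ []) :
    PySem.Chars.join sep groups.flatten
      = PySem.Chars.join sep (groups.map (PySem.Chars.join sep)) := by
  induction groups with
  | nil => rfl
  | cons g gs ih =>
    cases gs with
    | nil => simp [PySem.Chars.join_singleton]
    | cons g2 gs2 =>
      have hg : g ≠ [] := h g (by simp)
      have hg2 : g2 ≠ [] := h g2 (by simp)
      have hflat : (g2 :: gs2).flatten ≠ [] := by
        simp only [List.flatten_cons]
        intro he
        exact hg2 (List.append_eq_nil_iff.mp he).1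
      obtain ⟨y, t, hyt⟩ := List.exists_cons_of_ne_nil hflat
      rw [List.flatten_cons, hyt, join_append_cons' sep g hg y t, ← hyt]
      rw [ih (fun x hx => h x (by simp [hx]))]
      simp only [List.map_cons, PySem.Chars.join_cons_cons]

-- per word: A's contribution list is nonempty and joins to pvRepl
def pvProc (m : Int) (w : List Char) : List (List Char) :=
  if (w.length : Int) > m then pvChunks w m else [w]

theorem pvProc_ne_nil (m : Int) (hm : 1 ≤ m) (w : List Char) : pvProc m w ≠ [] := by
  unfold pvProc
  split
  · rename_i hlong
    apply pvChunks_ne_nil w m _ hm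
    intro he
    rw [he] at hlong
    simp at hlong
    omega
  · simp

theorem join_pvProc (m : Int) (w : List Char) : PySem.Chars.join [' '] (pvProc m w) = pvRepl w m := by
  unfold pvProc pvRepl
  split
  · rfl
  · exact PySem.Chars.join_singleton _ _

theorem lineA_eq_lineF (m : Int) (hm : 1 ≤ m) (line : List Char) :
    PySem.Chars.join [' ']
      ((PySem.Chars.splitOn line [' ']).foldl (fun nw w =>
        if (w.length : Int) > m then nw ++ pvChunks w m else nw ++ [w]) [])
      = pvLineF m line := by
  rw [charsSplitOn_eq]
  have hfun : (fun (nw : List (List Char)) w =>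
      if (w.length : Int) > m then nw ++ pvChunks w m else nw ++ [w])
      = fun nw w => nw ++ pvProc m w := by
    funext nw w
    unfold pvProc
    split <;> rfl
  rw [hfun, PySem.List.foldl_append_eq_flatMap, List.nil_append]
  rw [List.flatMap_def]
  rw [join_flatten [' '] _ (by
    intro g hg
    rw [List.mem_map] at hg
    obtain ⟨w, _, hw⟩ := hg
    rw [← hw]
    exact pvProc_ne_nil m hm w)]
  unfold pvLineF
  rw [List.map_map]
  have hfe : (PySem.Chars.join [' '] ∘ pvProc m) = (fun w => pvRepl w m) :=
    funext (join_pvProc m)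
  rw [hfe]

theorem A_eq_core (text : String) (m : Int) (hm : 1 ≤ m) :
    wrap_long_words text m = String.ofList (pvCore m text.toList) := by
  unfold wrap_long_words pvCore
  simp only [PySem.List.foldl_append_singleton_eq_map, List.nil_append]
  rw [charsSplitOn_eq]
  congr 2
  exact List.map_congr_left (fun line _ => lineA_eq_lineF m hm line)

-- shape of the head of the rest after a maximal run
theorem pvNonSep_false_iff (c : Char) : pvNonSep c = false ↔ c = ' ' ∨ c = '\n' := by
  unfold pvNonSep
  simp
  tauto

theorem pvLineF_nil (m : Int) (hm : 1 ≤ m) : pvLineF m [] = [] := by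
  unfold pvLineF
  have : ([] : List Char).splitOn ' ' = [[]] := by simp [List.splitOn]
  rw [this]
  simp [PySem.Chars.join_singleton, pvRepl_nil m hm]

theorem pvLineF_cons_space (m : Int) (hm : 1 ≤ m) (h : List Char) :
    pvLineF m (' ' :: h) = ' ' :: pvLineF m h := by
  unfold pvLineF
  rw [splitOn_cons_self, List.map_cons]
  cases hmm : (h.splitOn ' ').map (pvRepl · m) with
  | nil =>
    rw [List.map_eq_nil_iff] at hmm
    exact absurd hmm (List.splitOnP_ne_nil _ h)
  | cons y t =>
    rw [PySem.Chars.join_cons_cons, pvRepl_nil m hm]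
    rfl

theorem pvCore_nil (m : Int) (hm : 1 ≤ m) : pvCore m [] = [] := by
  unfold pvCore
  have : ([] : List Char).splitOn '\n' = [[]] := by simp [List.splitOn]
  rw [this]
  simp [PySem.Chars.join_singleton, pvLineF_nil m hm]

theorem pvCore_cons_newline (m : Int) (hm : 1 ≤ m) (rest : List Char) :
    pvCore m ('\n' :: rest) = '\n' :: pvCore m rest := by
  unfold pvCore
  rw [splitOn_cons_self, List.map_cons]
  cases hmm : (rest.splitOn '\n').map (pvLineF m) with
  | nil =>
    rw [List.map_eq_nil_iff] at hmm
    exact absurd hmm (List.splitOnP_ne_nil _ rest)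
  | cons y t =>
    rw [PySem.Chars.join_cons_cons, pvLineF_nil m hm]
    rfl

theorem pvCore_cons_space (m : Int) (hm : 1 ≤ m) (rest : List Char) :
    pvCore m (' ' :: rest) = ' ' :: pvCore m rest := by
  unfold pvCore
  have hsp : (' ' :: rest).splitOn '\n' = (rest.splitOn '\n').modifyHead ([' '] ++ ·) := by
    have := splitOn_append_not_mem '\n' [' '] rest (by simp)
    simpa using this
  rw [hsp]
  cases hr : rest.splitOn '\n' with
  | nil => exact absurd hr (List.splitOnP_ne_nil _ rest)
  | cons h t =>
    simp only [List.modifyHead_cons, List.map_cons, List.singleton_append]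
    rw [pvLineF_cons_space m hm h]
    exact join_cons_append ['\n'] [' '] (pvLineF m h) (t.map (pvLineF m))

theorem pvLineF_word_space (m : Int) (hm : 1 ≤ m) (w h : List Char) (hsp : ' ' ∉ w) :
    pvLineF m (w ++ ' ' :: h) = pvRepl w m ++ pvLineF m (' ' :: h) := by
  unfold pvLineF
  rw [splitOn_append_not_mem ' ' w (' ' :: h) hsp, splitOn_cons_self]
  simp only [List.modifyHead_cons, List.map_cons]
  rw [pvRepl_nil m hm]
  cases hmm : (h.splitOn ' ').map (pvRepl · m) with
  | nil =>
    rw [List.map_eq_nil_iff] at hmm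
    exact absurd hmm (List.splitOnP_ne_nil _ h)
  | cons y t =>
    rw [PySem.Chars.join_cons_cons, PySem.Chars.join_cons_cons]
    simp [List.append_assoc]

theorem pvLineF_word_only (m : Int) (w : List Char) (hsp : ' ' ∉ w) :
    pvLineF m w = pvRepl w m := by
  unfold pvLineF
  rw [splitOn_singleton_of_not_mem ' ' w hsp]
  simp [PySem.Chars.join_singleton]

theorem pvCore_word (m : Int) (hm : 1 ≤ m) (w r : List Char)
    (hsp : ' ' ∉ w) (hnl : '\n' ∉ w)
    (hr : r = [] ∨ (∃ t, r = ' ' :: t) ∨ (∃ t, r = '\n' :: t)) :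
    pvCore m (w ++ r) = pvRepl w m ++ pvCore m r := by
  rcases hr with hr | ⟨t, hr⟩ | ⟨t, hr⟩
  · subst hr
    rw [List.append_nil, pvCore_nil m hm, List.append_nil]
    unfold pvCore
    rw [splitOn_singleton_of_not_mem '\n' w hnl]
    simp [PySem.Chars.join_singleton, pvLineF_word_only m w hsp]
  · subst hr
    unfold pvCore
    rw [splitOn_append_not_mem '\n' w (' ' :: t) hnl]
    have hsp2 : (' ' :: t).splitOn '\n' = (t.splitOn '\n').modifyHead ([' '] ++ ·) := by
      have := splitOn_append_not_mem '\n' [' '] t (by simp)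
      simpa using this
    rw [hsp2]
    cases hts : t.splitOn '\n' with
    | nil => exact absurd hts (List.splitOnP_ne_nil _ t)
    | cons h t' =>
      simp only [List.modifyHead_cons, List.map_cons, List.singleton_append]
      rw [pvLineF_word_space m hm w h hsp, pvLineF_cons_space m hm h]
      exact join_cons_append ['\n'] (pvRepl w m) (' ' :: pvLineF m h) (t'.map (pvLineF m))
  · subst hr
    unfold pvCore
    rw [splitOn_append_not_mem '\n' w ('\n' :: t) hnl, splitOn_cons_self]
    simp only [List.modifyHead_cons, List.map_cons, List.append_nil]
    rw [pvLineF_word_only m w hsp, pvLineF_nil m hm]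
    cases hmm : (t.splitOn '\n').map (pvLineF m) with
    | nil =>
      rw [List.map_eq_nil_iff] at hmm
      exact absurd hmm (List.splitOnP_ne_nil _ t)
    | cons y t' =>
      rw [PySem.Chars.join_cons_cons, PySem.Chars.join_cons_cons]
      simp [List.append_assoc]

theorem scan_eq_core (m : Int) (hm : 1 ≤ m) (l : List Char) : pvScan m l = pvCore m l := by
  induction l using pvScan.induct with
  | case1 => rw [pvScan, pvCore_nil m hm]
  | case2 c rest hc ih =>
    rw [pvScan, if_pos hc]
    rw [ih]
    set w := c :: rest.takeWhile pvNonSep with hw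
    have hwall : ∀ ch ∈ w, pvNonSep ch = true := by
      intro ch hch
      rcases List.mem_cons.mp hch with h | h
      · subst h; exact hc
      · exact List.mem_takeWhile_imp h
    have hsp : ' ' ∉ w := fun h => by simpa [pvNonSep] using hwall ' ' h
    have hnl : '\n' ∉ w := fun h => by simpa [pvNonSep] using hwall '\n' h
    have hsplit : c :: rest = w ++ rest.dropWhile pvNonSep := by
      rw [hw, List.cons_append, List.takeWhile_append_dropWhile]
    rw [hsplit]
    refine (pvCore_word m hm w _ hsp hnl ?_).symm
    cases hd : rest.dropWhile pvNonSep with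
    | nil => exact Or.inl rfl
    | cons d t =>
      have hdns : pvNonSep d = false := by
        have h1 : rest.dropWhile pvNonSep ≠ [] := by rw [hd]; simp
        have h2 := List.head_dropWhile_not pvNonSep h1
        simpa [hd] using h2
      rcases (pvNonSep_false_iff d).mp hdns with h | h
      · exact Or.inr (Or.inl ⟨t, by rw [h]⟩)
      · exact Or.inr (Or.inr ⟨t, by rw [h]⟩)
  | case3 c rest hc ih =>
    rw [pvScan, if_neg hc]
    rw [ih]
    rcases (pvNonSep_false_iff c).mp (Bool.not_eq_true _ ▸ (by simpa using hc)) with h | h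
    · subst h; exact (pvCore_cons_space m hm rest).symm
    · subst h; exact (pvCore_cons_newline m hm rest).symm

-- ===== VERDICT (by name: the statement is the Claim_ definition above) =====
theorem wrap_long_words_spec : Claim_equal_wrap_long_words := by
  intro text max_len _hdom hpre
  unfold Spec_wrap_long_words wrap_long_words_alt
  have hm : 1 ≤ max_len := hpre
  rw [A_eq_core text max_len hm, scan_eq_core max_len hm]
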